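-- pv_equiv track=rewrite | github.com/cms02snu/Algorithm | baekjoon/2877.py | maxk
-- ===== SOURCE A (Python) =====
-- def maxk(n):
--     i = 0
--     k = 0
--
--     while True:
--         if 2*(2**(i+1)-1)>n:
--             return i,k
--         else:
--             i += 1
--             k = 2*(2**i-1)
-- ===== SOURCE B (Python) =====
-- def maxk(n):
--     m = n // 2 + 1
--     i = m.bit_length() - 1 if m >= 1 else 0
--     k = 2 * (2 ** i - 1)
--     return i, k
-- ===== Notes on version B (the rewrite author's own statement) =====
-- stated objective: simpler
-- what changed: Replaced A's incremental while-loop (growing i until 2*(2^(i+1)-1) > n) by a closed-form computation: i = (n//2 + 1).bit_length() - 1 (clamped to 0 when n//2+1 < 1) and k = 2*(2^i - 1).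
import Mathlib
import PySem

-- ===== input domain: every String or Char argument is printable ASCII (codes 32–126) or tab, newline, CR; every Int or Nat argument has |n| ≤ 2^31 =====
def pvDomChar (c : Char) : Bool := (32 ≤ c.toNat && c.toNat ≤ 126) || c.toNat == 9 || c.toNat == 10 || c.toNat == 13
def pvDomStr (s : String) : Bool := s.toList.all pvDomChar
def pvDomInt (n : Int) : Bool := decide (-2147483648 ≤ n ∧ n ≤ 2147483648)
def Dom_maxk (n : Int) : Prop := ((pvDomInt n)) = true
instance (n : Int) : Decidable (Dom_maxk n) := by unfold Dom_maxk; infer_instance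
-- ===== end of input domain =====

-- B replaces A's incremental doubling loop by a closed-form answer read off the bit length of n//2 + 1 (objective: simpler; same tiny cost on these inputs).

-- ===== PORT A =====
-- the 'while True' loop of A; i counts the increments, k is A's variable k
def maxkLoop (n : Int) (i : Nat) (k : Int) : Int × Int :=
  if 2 * ((2:Int) ^ (i + 1) - 1) > n then ((i : Int), k)
  else maxkLoop n (i + 1) (2 * ((2:Int) ^ (i + 1) - 1))
termination_by n.toNat + 1 - i
decreasing_by
  have h2 : ((i:Int) + 2) ≤ 2 ^ (i + 1) := by
    exact_mod_cast Nat.succ_le_of_lt (Nat.lt_two_pow_self (n := i + 1))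
  omega

def maxk (n : Int) : Int × Int := maxkLoop n 0 0

-- ===== PORT B =====
-- m.bit_length() is PySem.Int.bitLength (Python-exact)
def maxk_alt (n : Int) : Int × Int :=
  let m := PySem.Int.floordiv n 2 + 1
  let i : Nat := if 1 ≤ m then PySem.Int.bitLength m - 1 else 0
  ((i : Int), 2 * ((2:Int) ^ i - 1))

-- ===== PRECONDITION & SPEC =====
def Spec_maxk (n : Int) (out : Int × Int) : Prop := out = maxk_alt n
instance (n : Int) (out : Int × Int) : Decidable (Spec_maxk n out) := by unfold Spec_maxk; infer_instance

-- ===== CLAIM (what is proved, stated in full; the proofs are below) =====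
def Claim_equal_maxk : Prop := ∀ (n : Int), Dom_maxk n → Spec_maxk n (maxk n)

-- ===== LEMMAS AND PROOFS =====

-- A's loop guard, rephrased through m = n // 2 + 1
theorem guard_iff (n : Int) (i : Nat) :
    (2 * ((2:Int) ^ (i + 1) - 1) > n) ↔ PySem.Int.floordiv n 2 + 1 < 2 ^ (i + 1) := by
  rw [PySem.Int.floordiv_eq_ediv_of_pos (by omega)]
  generalize (2:Int) ^ (i + 1) = p
  omega

-- running the loop with the invariant k = 2*(2^i - 1), as long as 2^i ≤ m:
-- it stops exactly at the largest exponent i with 2^i ≤ m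
theorem loop_run (n : Int) (I : Nat) (i : Nat)
    (h : (2:Int) ^ i ≤ PySem.Int.floordiv n 2 + 1)
    (hI : (2:Int) ^ I ≤ PySem.Int.floordiv n 2 + 1)
    (hI2 : PySem.Int.floordiv n 2 + 1 < 2 ^ (I + 1))
    (hle : i ≤ I) :
    maxkLoop n i (2 * ((2:Int) ^ i - 1)) = ((I : Int), 2 * ((2:Int) ^ I - 1)) := by
  induction hd : I - i generalizing i with
  | zero =>
    have heq : i = I := by omega
    subst heq
    rw [maxkLoop, if_pos ((guard_iff n i).mpr hI2)]
  | succ d ih =>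
    have hstep : ¬ (2 * ((2:Int) ^ (i + 1) - 1) > n) := by
      intro hg
      rw [guard_iff] at hg
      have hp : (2:Int) ^ (i + 1) ≤ 2 ^ I := pow_le_pow_right₀ (by norm_num) (by omega)
      linarith
    rw [maxkLoop, if_neg hstep]
    apply ih
    · calc (2:Int) ^ (i + 1) ≤ 2 ^ I := pow_le_pow_right₀ (by norm_num) (by omega)
        _ ≤ _ := hI
    · omega
    · omega

-- bitLength characterisation for positive m: i := bitLength m - 1 is the largest i with 2^i ≤ m
theorem bitLength_bounds (m : Int) (hm : 1 ≤ m) :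
    (2:Int) ^ (PySem.Int.bitLength m - 1) ≤ m ∧ m < 2 ^ (PySem.Int.bitLength m - 1 + 1) := by
  have hne : m ≠ 0 := by omega
  have h1 : 2 ^ (PySem.Int.bitLength m - 1) ≤ m.natAbs := PySem.Int.two_pow_bitLength_le m hne
  have h2 : m.natAbs < 2 ^ PySem.Int.bitLength m := PySem.Int.lt_two_pow_bitLength m
  have hb : 1 ≤ PySem.Int.bitLength m := by
    by_contra hc
    have h0 : PySem.Int.bitLength m = 0 := by omega
    rw [h0] at h2
    simp at h2
    omega
  constructor
  · calc (2:Int) ^ (PySem.Int.bitLength m - 1) = ((2 ^ (PySem.Int.bitLength m - 1) : Nat) : Int) := by push_cast; ring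
      _ ≤ (m.natAbs : Int) := by exact_mod_cast h1
      _ = m := by omega
  · have he : PySem.Int.bitLength m - 1 + 1 = PySem.Int.bitLength m := by omega
    rw [he]
    calc m = (m.natAbs : Int) := by omega
      _ < ((2 ^ PySem.Int.bitLength m : Nat) : Int) := by exact_mod_cast h2
      _ = (2:Int) ^ PySem.Int.bitLength m := by push_cast; ring

-- ===== VERDICT (by name: the statement is the Claim_ definition above) =====
theorem maxk_spec : Claim_equal_maxk := by
  intro n _
  unfold Spec_maxk maxk maxk_alt
  dsimp only
  by_cases h1 : 1 ≤ PySem.Int.floordiv n 2 + 1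
  · obtain ⟨hlo, hhi⟩ := bitLength_bounds _ h1
    have key := loop_run n (PySem.Int.bitLength (PySem.Int.floordiv n 2 + 1) - 1) 0
      (by simpa using h1) hlo hhi (Nat.zero_le _)
    rw [show (0:Int) = 2 * ((2:Int) ^ (0:Nat) - 1) by norm_num, key, if_pos h1]
  · rw [maxkLoop, if_pos ((guard_iff n 0).mpr (by
      have : ((2:Int) ^ (0 + 1)) = 2 := by norm_num
      omega)), if_neg h1]
    norm_num
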